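-- pv_equiv track=rewrite | github.com/KimGyeongHyun/back | 3-06/ex_01292.py | easy_prob
-- ===== SOURCE A (Python) =====
-- def easy_prob(a, b):
--
--     sum_number = 1
--     count = 1
--     sum = 0
--
--     for i in range(1, 1001):
--         if b < i:
--             break
--         if a <= i <= b:
--             sum += sum_number
--         if sum_number == count:
--             count = 1
--             sum_number += 1
--         else:
--             count += 1
--
--     return sum
-- ===== SOURCE B (Python) =====
-- def easy_prob(a, b):
--     lo = max(a, 1)
--     hi = min(b, 1000)
--     if hi < lo:
--         return 0
--
--     def prefix(n):
--         # total of staircase values at positions 1..n (0 <= n <= 1000):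
--         # find the row k with T(k) <= n < T(k+1), T(k) = k(k+1)//2, then
--         # full rows contribute 1^2+...+k^2 and the partial row contributes (n-T(k))*(k+1)
--         k = 0
--         while (k + 1) * (k + 2) // 2 <= n:
--             k += 1
--         return k * (k + 1) * (2 * k + 1) // 6 + (n - k * (k + 1) // 2) * (k + 1)
--
--     return prefix(hi) - prefix(lo - 1)
-- ===== Notes on version B (the rewrite author's own statement) =====
-- stated objective: alternative
-- what changed: Replaces A's per-index loop with a counter state machine by a closed-form computation: the answer is prefix(min(b,1000)) - prefix(max(a,1)-1), where prefix(n) locates n's row k in O(sqrt(n)) steps and uses the sum-of-squares formula for the full rows plus a product for the partial row.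
import Mathlib
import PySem

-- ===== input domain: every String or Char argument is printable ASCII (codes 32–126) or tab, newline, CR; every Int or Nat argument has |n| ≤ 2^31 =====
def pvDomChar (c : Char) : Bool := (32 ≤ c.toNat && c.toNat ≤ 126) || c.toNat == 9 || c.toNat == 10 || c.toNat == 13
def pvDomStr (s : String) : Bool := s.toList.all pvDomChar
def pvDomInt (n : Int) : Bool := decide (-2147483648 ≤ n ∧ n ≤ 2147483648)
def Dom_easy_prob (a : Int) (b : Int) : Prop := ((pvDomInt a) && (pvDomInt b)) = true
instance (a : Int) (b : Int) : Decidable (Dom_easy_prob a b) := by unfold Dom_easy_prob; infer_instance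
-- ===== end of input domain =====

-- B replaces A's per-index loop with a closed-form prefix-sum difference:
-- prefix(n) finds n's row k by a square-root-time search and uses the sum-of-squares
-- formula (objective: alternative).

-- ===== PORT A =====
-- A's for-loop over range(1,1001) with state (sum_number, count, sum) and break on b < i.
def aLoop (a b : Int) : List Int → Int → Int → Int → Int
  | [], _, _, s => s
  | i :: rest, sn, cnt, s =>
    if b < i then s
    else
      let s' := if a ≤ i ∧ i ≤ b then s + sn else s
      if sn = cnt then aLoop a b rest (sn + 1) 1 s'
      else aLoop a b rest sn (cnt + 1) s'

def easy_prob (a : Int) (b : Int) : Int :=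
  aLoop a b (PySem.List.pyRange 1 1001 1) 1 1 0

-- ===== PORT B =====
-- B's while loop: increment k while (k+1)*(k+2)//2 <= n.  Fuel bounds the recursion only;
-- 1001 steps always suffice for the arguments easy_prob_alt passes (n ≤ 1000).
def bFind (n : Int) : Nat → Int → Int
  | 0, k => k
  | f + 1, k =>
    if PySem.Int.floordiv ((k + 1) * (k + 2)) 2 ≤ n then bFind n f (k + 1) else k

-- B's prefix(n): full rows 1..k plus the partial row of value k+1.
def bPrefix (n : Int) : Int :=
  let k := bFind n 1001 0
  PySem.Int.floordiv (k * (k + 1) * (2 * k + 1)) 6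
    + (n - PySem.Int.floordiv (k * (k + 1)) 2) * (k + 1)

def easy_prob_alt (a : Int) (b : Int) : Int :=
  let lo := max a 1
  let hi := min b 1000
  if hi < lo then 0 else bPrefix hi - bPrefix (lo - 1)

-- ===== PRECONDITION & SPEC =====
def Spec_easy_prob (a : Int) (b : Int) (out : Int) : Prop := out = easy_prob_alt a b
instance (a : Int) (b : Int) (out : Int) : Decidable (Spec_easy_prob a b out) := by
  unfold Spec_easy_prob; infer_instance

-- ===== CLAIM =====
def Claim_equal_easy_prob : Prop :=
  ∀ (a : Int) (b : Int), Dom_easy_prob a b → Spec_easy_prob a b (easy_prob a b)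

-- ===== LEMMAS AND PROOFS =====

-- Triangular numbers T(k) = 1 + 2 + … + k and square pyramids Q(k) = 1² + … + k².
def Tn : Nat → Int
  | 0 => 0
  | k + 1 => Tn k + (k + 1)

def Qn : Nat → Int
  | 0 => 0
  | k + 1 => Qn k + ((k : Int) + 1) ^ 2

lemma Tn_mul (k : Nat) : 2 * Tn k = (k : Int) * (k + 1) := by
  induction k with
  | zero => simp [Tn]
  | succ m ih => simp only [Tn]; push_cast; push_cast at ih; ring_nf; ring_nf at ih; omega

lemma Qn_mul (k : Nat) : 6 * Qn k = (k : Int) * (k + 1) * (2 * k + 1) := by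
  induction k with
  | zero => simp [Qn]
  | succ m ih => simp only [Qn]; push_cast; push_cast at ih; ring_nf; ring_nf at ih; nlinarith

lemma Tn_nonneg (k : Nat) : 0 ≤ Tn k := by
  induction k with
  | zero => simp [Tn]
  | succ m ih => simp only [Tn]; positivity

lemma Tn_ge_self (k : Nat) : (k : Int) ≤ Tn k := by
  induction k with
  | zero => simp [Tn]
  | succ m ih => simp only [Tn]; push_cast; omega

lemma Tn_mono {k m : Nat} (h : k ≤ m) : Tn k ≤ Tn m := by
  induction m with
  | zero => interval_cases k; simp
  | succ p ih =>
    rcases Nat.lt_or_ge k (p + 1) with h1 | h1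
    · have := ih (by omega)
      simp only [Tn]; omega
    · have : k = p + 1 := by omega
      simp [this]

-- floor division by a positive constant of an exact multiple.
lemma fdiv_exact (c x : Int) (hc : 0 < c) : PySem.Int.floordiv (c * x) c = x := by
  rw [PySem.Int.floordiv_eq_iff_of_pos hc]; constructor <;> nlinarith

-- The while-loop condition is exactly Tn (r+1) ≤ n.
lemma bFind_cond (r : Nat) (n : Int) :
    (PySem.Int.floordiv (((r : Int) + 1) * ((r : Int) + 2)) 2 ≤ n) ↔ Tn (r + 1) ≤ n := by
  have h : ((r : Int) + 1) * ((r : Int) + 2) = 2 * Tn (r + 1) := by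
    have h0 := Tn_mul (r + 1); push_cast at h0; linear_combination h0.symm
  rw [h, fdiv_exact 2 (Tn (r + 1)) (by norm_num)]

-- bFind returns the row r' with Tn r' ≤ n < Tn (r'+1), given enough fuel.
lemma bFind_spec (n : Int) : ∀ (f : Nat) (r r' : Nat), r ≤ r' → Tn r' ≤ n → n < Tn (r' + 1) →
    r' - r < f → bFind n f (r : Int) = (r' : Int) := by
  intro f
  induction f with
  | zero => intro r r' _ _ _ h; omega
  | succ g ih =>
    intro r r' hle hlo hhi hf
    simp only [bFind]
    rcases Nat.lt_or_ge r r' with h1 | h1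
    · rw [if_pos]
      · have : ((r : Int) + 1) = ((r + 1 : Nat) : Int) := by push_cast; ring
        rw [this]
        exact ih (r + 1) r' (by omega) hlo hhi (by omega)
      · exact (bFind_cond r n).mpr (le_trans (Tn_mono (by omega)) hlo)
    · have : r = r' := by omega
      subst this
      rw [if_neg]
      exact fun h => absurd ((bFind_cond r n).mp h) (by omega)

-- Closed form of bPrefix on row r: for Tn r ≤ j ≤ Tn (r+1), j ≤ 1000.
lemma bPrefix_closed (r : Nat) (j : Int) (hlo : Tn r ≤ j) (hhi : j ≤ Tn (r + 1))
    (hcap : j ≤ 1000) : bPrefix j = Qn r + (j - Tn r) * ((r : Int) + 1) := by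
  have hr_le : (r : Nat) ≤ 1000 := by
    have := Tn_ge_self r; omega
  have hTQ : ∀ m : Nat, PySem.Int.floordiv ((m : Int) * ((m : Int) + 1) * (2 * (m : Int) + 1)) 6 = Qn m ∧
      PySem.Int.floordiv ((m : Int) * ((m : Int) + 1)) 2 = Tn m := by
    intro m
    constructor
    · have h6 : (m : Int) * ((m : Int) + 1) * (2 * (m : Int) + 1) = 6 * Qn m := (Qn_mul m).symm
      rw [h6, fdiv_exact 6 (Qn m) (by norm_num)]
    · have h2 : (m : Int) * ((m : Int) + 1) = 2 * Tn m := (Tn_mul m).symm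
      rw [h2, fdiv_exact 2 (Tn m) (by norm_num)]
  rcases lt_or_eq_of_le hhi with hlt | heq
  · -- j strictly inside row r+1 (or at its left boundary): bFind gives r
    have hfind : bFind j 1001 0 = (r : Int) := by
      have := bFind_spec j 1001 0 r (by omega) hlo hlt (by omega)
      simpa using this
    simp only [bPrefix, hfind, (hTQ r).1, (hTQ r).2]
  · -- j = Tn (r+1): bFind gives r+1, and the partial-row term vanishes
    have hr1_le : r + 1 ≤ 1000 := by
      have := Tn_ge_self (r + 1); omega
    have hfind : bFind j 1001 0 = ((r + 1 : Nat) : Int) := by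
      have hhi2 : j < Tn (r + 2) := by
        have : Tn (r + 2) = Tn (r + 1) + (r + 2) := rfl
        omega
      have := bFind_spec j 1001 0 (r + 1) (by omega) (by omega) hhi2 (by omega)
      simpa using this
    have hcast : bFind j 1001 0 = (r : Int) + 1 := by rw [hfind]; push_cast; ring
    simp only [bPrefix, hcast]
    have hQprod : PySem.Int.floordiv (((r : Int) + 1) * ((r : Int) + 1 + 1) * (2 * ((r : Int) + 1) + 1)) 6 = Qn (r + 1) := by
      have h6 : ((r : Int) + 1) * ((r : Int) + 1 + 1) * (2 * ((r : Int) + 1) + 1) = 6 * Qn (r + 1) := by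
        have h0 := Qn_mul (r + 1); push_cast at h0; linear_combination h0.symm
      rw [h6, fdiv_exact 6 (Qn (r + 1)) (by norm_num)]
    have hTprod : PySem.Int.floordiv (((r : Int) + 1) * ((r : Int) + 1 + 1)) 2 = Tn (r + 1) := by
      have h2 : ((r : Int) + 1) * ((r : Int) + 1 + 1) = 2 * Tn (r + 1) := by
        have h0 := Tn_mul (r + 1); push_cast at h0; linear_combination h0.symm
      rw [h2, fdiv_exact 2 (Tn (r + 1)) (by norm_num)]
    rw [hQprod, hTprod]
    have hQ : Qn (r + 1) = Qn r + ((r : Int) + 1) ^ 2 := rfl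
    have hT : Tn (r + 1) = Tn r + ((r : Int) + 1) := rfl
    rw [hQ, show j - Tn (r + 1) = 0 from by omega, show j - Tn r = (r : Int) + 1 from by omega]
    ring

-- One step of the prefix function: positions in row r+1 have value r+1.
lemma bPrefix_step (r : Nat) (j : Int) (hlo : Tn r < j) (hhi : j ≤ Tn (r + 1))
    (hcap : j ≤ 1000) : bPrefix j = bPrefix (j - 1) + ((r : Int) + 1) := by
  rw [bPrefix_closed r j (by omega) hhi hcap,
      bPrefix_closed r (j - 1) (by omega) (by omega) (by omega)]
  ring

-- Simulation: A's loop from index i+1 in state (r+1, cnt) with i = Tn r + (cnt - 1)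
-- computes the prefix-sum difference that B returns.
lemma Asim (a b : Int) : ∀ (n : Nat) (i s : Int) (r : Nat) (cnt : Int),
    i + n = 1000 → 1 ≤ cnt → cnt ≤ (r : Int) + 1 → i = Tn r + (cnt - 1) →
    aLoop a b (PySem.List.pyRange (i + 1) 1001 1) ((r : Int) + 1) cnt s
      = if min b 1000 < max a (i + 1) then s
        else s + (bPrefix (min b 1000) - bPrefix (max a (i + 1) - 1)) := by
  intro n
  induction n with
  | zero =>
    intro i s r cnt hi _ _ _
    rw [PySem.List.pyRange_one_eq_nil (by omega)]
    simp only [aLoop]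
    rw [if_pos (by omega)]
  | succ m ih =>
    intro i s r cnt hi hc1 hc2 hstate
    have hTnn := Tn_nonneg r
    rw [PySem.List.pyRange_one_cons (by omega)]
    simp only [aLoop]
    by_cases hb : b < i + 1
    · rw [if_pos hb, if_pos (by omega)]
    · rw [if_neg hb]
      have hhi_ge : i + 1 ≤ min b 1000 := by omega
      have hmem : (a ≤ i + 1 ∧ i + 1 ≤ b) ↔ a ≤ i + 1 := by omega
      have hrow_lo : Tn r < i + 1 := by omega
      have hrow_hi : i + 1 ≤ Tn (r + 1) := by
        have : Tn (r + 1) = Tn r + ((r : Int) + 1) := rfl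
        omega
      have hstep := bPrefix_step r (i + 1) hrow_lo hrow_hi (by omega)
      rw [show i + 1 - 1 = i from by ring] at hstep
      have hT1 : Tn (r + 1) = Tn r + ((r : Int) + 1) := rfl
      by_cases hsn : ((r : Int) + 1 = cnt)
      · -- last position of row r+1: A resets to (r+2, 1)
        rw [if_pos hsn]
        by_cases ha : a ≤ i + 1
        · rw [if_pos (show a ≤ i + 1 ∧ i + 1 ≤ b from ⟨ha, by omega⟩)]
          have ihh := ih (i + 1) (s + ((r : Int) + 1)) (r + 1) 1 (by omega) (by norm_num)
            (by push_cast; omega) (by have := hT1; omega)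
          rw [show (r : Int) + 1 + 1 = ((r + 1 : Nat) : Int) + 1 from by push_cast; ring]
          rw [ihh, show i + 1 + 1 = i + 2 from by ring,
              show max a (i + 1) = i + 1 from by omega,
              show max a (i + 2) = i + 2 from by omega,
              if_neg (show ¬ min b 1000 < i + 1 from by omega)]
          by_cases hend : min b 1000 < i + 2
          · rw [if_pos hend, show min b 1000 = i + 1 from by omega,
                show i + 1 - 1 = i from by ring]
            linarith [hstep]
          · rw [if_neg hend, show i + 2 - 1 = i + 1 from by ring,
                show i + 1 - 1 = i from by ring]
            linarith [hstep]
        · rw [if_neg (show ¬ (a ≤ i + 1 ∧ i + 1 ≤ b) from fun h => ha h.1)]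
          have ihh := ih (i + 1) s (r + 1) 1 (by omega) (by norm_num)
            (by push_cast; omega) (by have := hT1; omega)
          rw [show (r : Int) + 1 + 1 = ((r + 1 : Nat) : Int) + 1 from by push_cast; ring]
          rw [ihh, show i + 1 + 1 = i + 2 from by ring,
              show max a (i + 2) = a from by omega,
              show max a (i + 1) = a from by omega]
      · -- row continues: A keeps sum_number, increments count
        rw [if_neg hsn]
        by_cases ha : a ≤ i + 1
        · rw [if_pos (show a ≤ i + 1 ∧ i + 1 ≤ b from ⟨ha, by omega⟩)]
          have ihh := ih (i + 1) (s + ((r : Int) + 1)) r (cnt + 1) (by omega) (by omega)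
            (by omega) (by omega)
          rw [ihh, show i + 1 + 1 = i + 2 from by ring,
              show max a (i + 1) = i + 1 from by omega,
              show max a (i + 2) = i + 2 from by omega,
              if_neg (show ¬ min b 1000 < i + 1 from by omega)]
          by_cases hend : min b 1000 < i + 2
          · rw [if_pos hend, show min b 1000 = i + 1 from by omega,
                show i + 1 - 1 = i from by ring]
            linarith [hstep]
          · rw [if_neg hend, show i + 2 - 1 = i + 1 from by ring,
                show i + 1 - 1 = i from by ring]
            linarith [hstep]
        · rw [if_neg (show ¬ (a ≤ i + 1 ∧ i + 1 ≤ b) from fun h => ha h.1)]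
          have ihh := ih (i + 1) s r (cnt + 1) (by omega) (by omega) (by omega) (by omega)
          rw [ihh, show i + 1 + 1 = i + 2 from by ring,
              show max a (i + 2) = a from by omega,
              show max a (i + 1) = a from by omega]

-- ===== VERDICT =====
theorem easy_prob_spec : Claim_equal_easy_prob := by
  intro a b _
  unfold Spec_easy_prob easy_prob easy_prob_alt
  have h := Asim a b 1000 0 0 0 1 (by norm_num) (by norm_num) (by norm_num) (by simp [Tn])
  norm_num at h
  rw [show (1 : Int) = 0 + 1 by ring] at h ⊢
  rw [h]
  by_cases hc : min b 1000 < max a (0 + 1)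
  · rw [if_pos hc, if_pos (by omega)]
  · rw [if_neg hc, if_neg (by omega)]
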